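-- pv_equiv track=rewrite | github.com/jw9603/CodeTree | 250412/고대 문명 유적 탐사/ancient-ruin-exploration.py | count
-- ===== SOURCE A (Python) =====
-- from collections import deque
--
-- def count(grid, flag):
--
--     visited = [[False] * 5 for _ in range(5)]
--     total = 0
--
--     for i in range(5):
--         for j in range(5):
--             if not visited[i][j] and grid[i][j] != 0:
--                 total += bfs(grid, i, j, flag, visited)
--
--     return total
--
-- def bfs(grid, i, j, flag, visited):
--     queue = deque([(i, j)])
--     visited[i][j] = True
--     value = grid[i][j]
--     connected = set()
--     connected.add((i, j))
--
--     directions = [(-1, 0), (1, 0), (0, -1), (0, 1)]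
--
--     while queue:
--         ci, cj = queue.popleft()
--         for di, dj in directions:
--             ni, nj = ci + di, cj + dj
--             if 0 <= ni < 5 and 0 <= nj < 5 and not visited[ni][nj] and grid[ni][nj] == value:
--                 visited[ni][nj] = True
--                 queue.append((ni, nj))
--                 connected.add((ni, nj))
--
--     if len(connected) >= 3:
--         if flag == 1:
--             for i, j in connected:
--                 grid[i][j] = 0
--         return len(connected)
--     else:
--         return 0
-- ===== SOURCE B (Python) =====
-- # Per-cell fixed-point closure instead of BFS with a shared visited matrix:
-- # count one point per qualifying cell (a component of size s contributes s),
-- # no queue and no visited bookkeeping.  Mutates grid the same way A does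
-- # (zeroes every cell of a qualifying component when flag == 1).
-- def count(grid, flag):
--     def component(si, sj):
--         comp = {(si, sj)}
--         # 25 cells, so 25 expansion rounds always reach the fixed point
--         for _ in range(25):
--             grown = set(comp)
--             for ci, cj in comp:
--                 for ni, nj in ((ci - 1, cj), (ci + 1, cj), (ci, cj - 1), (ci, cj + 1)):
--                     if 0 <= ni < 5 and 0 <= nj < 5 and grid[ni][nj] == grid[si][sj]:
--                         grown.add((ni, nj))
--             comp = grown
--         return comp
--
--     marked = [(i, j) for i in range(5) for j in range(5)
--               if grid[i][j] != 0 and len(component(i, j)) >= 3]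
--     if flag == 1:
--         for i, j in marked:
--             grid[i][j] = 0
--     return len(marked)
-- ===== Notes on version B (the rewrite author's own statement) =====
-- stated objective: simpler
-- what changed: A runs BFS with a shared 5x5 visited matrix and a queue, summing the sizes of components of >=3 equal nonzero cells; B drops the visited matrix and queue entirely and instead computes, for each nonzero cell independently, its component as a bounded fixed-point closure (25 expansion rounds of a set), counting one point per qualifying cell.
import Mathlib
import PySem

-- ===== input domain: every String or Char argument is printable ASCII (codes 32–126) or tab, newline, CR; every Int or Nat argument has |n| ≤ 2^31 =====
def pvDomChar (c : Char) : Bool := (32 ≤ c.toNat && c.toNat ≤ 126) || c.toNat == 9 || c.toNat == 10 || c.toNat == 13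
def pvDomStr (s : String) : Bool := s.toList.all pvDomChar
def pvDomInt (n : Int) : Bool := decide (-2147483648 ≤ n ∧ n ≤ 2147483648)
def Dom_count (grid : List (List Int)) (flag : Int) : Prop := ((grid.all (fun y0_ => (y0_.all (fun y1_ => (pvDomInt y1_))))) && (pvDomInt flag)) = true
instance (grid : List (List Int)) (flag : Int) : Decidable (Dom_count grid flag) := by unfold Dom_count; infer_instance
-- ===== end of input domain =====

-- B replaces A's BFS over a shared visited matrix by a per-cell fixed-point closure that
-- counts one point per qualifying cell; equivalence is about the RETURN value (both Pythons
-- also zero the same qualifying cells of grid in place when flag == 1).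

-- ===== PORT A =====
-- grid[i][j] / visited[i][j]: total forms, in range under Pre_count (indices are range(5)
-- values or bounds-checked before use)
def gget (grid : List (List Int)) (i j : Int) : Int :=
  PySem.List.pyGetD (PySem.List.pyGetD grid i []) j 0

def vget (v : List (List Bool)) (i j : Int) : Bool :=
  PySem.List.pyGetD (PySem.List.pyGetD v i []) j false

-- visited[i][j] = True
def vset (v : List (List Bool)) (i j : Int) : List (List Bool) :=
  PySem.List.pySetD v i (PySem.List.pySetD (PySem.List.pyGetD v i []) j true)

def dirs : List (Int × Int) := [(-1, 0), (1, 0), (0, -1), (0, 1)]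

-- body of A's `for di, dj in directions` pass (state: queue, visited, connected)
def bfsStep (grid : List (List Int)) (value : Int) (c : Int × Int)
    (st : List (Int × Int) × List (List Bool) × List (Int × Int)) (d : Int × Int) :
    List (Int × Int) × List (List Bool) × List (Int × Int) :=
  let ni := c.1 + d.1
  let nj := c.2 + d.2
  if 0 ≤ ni ∧ ni < 5 ∧ 0 ≤ nj ∧ nj < 5 ∧ vget st.2.1 ni nj = false ∧ gget grid ni nj = value
  then (st.1 ++ [(ni, nj)], vset st.2.1 ni nj, PySem.Set.add st.2.2 (ni, nj))
  else st

-- A's `while queue` loop; the fuel only makes the recursion structural (64 strictly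
-- exceeds the proved iteration bound 2*25 + 1)
def bfsLoop (grid : List (List Int)) (value : Int) :
    Nat → List (Int × Int) → List (List Bool) → List (Int × Int) →
    List (List Bool) × List (Int × Int)
  | 0, _, visited, connected => (visited, connected)
  | _ + 1, [], visited, connected => (visited, connected)
  | fuel + 1, c :: rest, visited, connected =>
      let st := dirs.foldl (bfsStep grid value c) (rest, visited, connected)
      bfsLoop grid value fuel st.1 st.2.1 st.2.2

-- A's bfs: returns (contribution to total, updated visited).  The `grid[i][j] = 0` writes
-- (flag == 1) touch only cells already marked visited, which A never reads again, so the
-- returned total is computed over the unmutated grid.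
def bfs (grid : List (List Int)) (i j flag : Int) (visited : List (List Bool)) :
    Int × List (List Bool) :=
  let visited1 := vset visited i j
  let value := gget grid i j
  let st := bfsLoop grid value 64 [(i, j)] visited1 [(i, j)]
  (if 3 ≤ st.2.length then (st.2.length : Int) else 0, st.1)

def count (grid : List (List Int)) (flag : Int) : Int :=
  ((PySem.List.pyRange 0 5 1).foldl
    (fun (st : List (List Bool) × Int) i =>
      (PySem.List.pyRange 0 5 1).foldl
        (fun (st : List (List Bool) × Int) j =>
          if vget st.1 i j = false ∧ gget grid i j ≠ 0 then
            let r := bfs grid i j flag st.1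
            (r.2, st.2 + r.1)
          else st)
        st)
    (List.replicate 5 (List.replicate 5 false), 0)).2

-- ===== PORT B =====
-- the four orthogonal neighbours ((ci-1,cj), (ci+1,cj), (ci,cj-1), (ci,cj+1))
def nbrs (c : Int × Int) : List (Int × Int) :=
  [(c.1 - 1, c.2), (c.1 + 1, c.2), (c.1, c.2 - 1), (c.1, c.2 + 1)]

-- B's component(si, sj): grow comp for 25 rounds, reaching the fixed point
def component (grid : List (List Int)) (si sj : Int) : List (Int × Int) :=
  (PySem.List.pyRange 0 25 1).foldl
    (fun comp _ =>
      comp.foldl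
        (fun grown c =>
          (nbrs c).foldl
            (fun g n =>
              if 0 ≤ n.1 ∧ n.1 < 5 ∧ 0 ≤ n.2 ∧ n.2 < 5 ∧ gget grid n.1 n.2 = gget grid si sj
              then PySem.Set.add g n else g)
            grown)
        comp)
    [(si, sj)]

-- B's marked list and return value; B's flag == 1 zeroing mutates grid only, leaving the
-- returned length unchanged.
def count_alt (grid : List (List Int)) (flag : Int) : Int :=
  let marked :=
    (PySem.List.pyRange 0 5 1).foldl
      (fun (acc : List (Int × Int)) i =>
        (PySem.List.pyRange 0 5 1).foldl
          (fun (acc : List (Int × Int)) j =>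
            if gget grid i j ≠ 0 ∧ 3 ≤ (component grid i j).length then acc ++ [(i, j)]
            else acc)
          acc)
      []
  (marked.length : Int)

-- ===== PRECONDITION & SPEC =====
-- Pre_count: exactly the grids with at least 5 rows whose first 5 rows have at least 5
-- entries; on anything smaller Python A raises IndexError at grid[i][j].
def Pre_count (grid : List (List Int)) (flag : Int) : Prop :=
  5 ≤ grid.length ∧ ∀ r ∈ grid.take 5, 5 ≤ r.length
instance (grid : List (List Int)) (flag : Int) : Decidable (Pre_count grid flag) := by
  unfold Pre_count; infer_instance

def pvWitness_count : List (List Int) × Int :=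
  ([[1, 1, 1, 0, 0], [0, 2, 0, 0, 0], [0, 2, 0, 0, 0], [0, 2, 0, 0, 0], [3, 0, 0, 0, 3]], 1)

def Spec_count (grid : List (List Int)) (flag : Int) (out : Int) : Prop := out = count_alt grid flag
instance (grid : List (List Int)) (flag : Int) (out : Int) : Decidable (Spec_count grid flag out) := by unfold Spec_count; infer_instance

-- ===== CLAIM (what is proved, stated in full; the proofs are below) =====
def Claim_equal_count : Prop := ∀ (grid : List (List Int)) (flag : Int), Dom_count grid flag → Pre_count grid flag → Spec_count grid flag (count grid flag)

-- ===== LEMMAS AND PROOFS =====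

-- ---- the 25-cell board ----

def cellsL : List (Int × Int) :=
  (PySem.List.pyRange 0 5 1).flatMap (fun i => (PySem.List.pyRange 0 5 1).map (fun j => (i, j)))

def inb (p : Int × Int) : Prop := 0 ≤ p.1 ∧ p.1 < 5 ∧ 0 ≤ p.2 ∧ p.2 < 5

def U25 : Finset (Int × Int) := cellsL.toFinset

lemma mem_cellsL (p : Int × Int) : p ∈ cellsL ↔ inb p := by
  constructor
  · intro h
    rw [cellsL] at h
    rcases List.mem_flatMap.1 h with ⟨i, hi, hm⟩
    rcases List.mem_map.1 hm with ⟨j, hj, rfl⟩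
    have h1 := (PySem.List.mem_pyRange_one).1 hi
    have h2 := (PySem.List.mem_pyRange_one).1 hj
    exact ⟨h1.1, h1.2, h2.1, h2.2⟩
  · intro h
    obtain ⟨h1, h2, h3, h4⟩ := h
    rw [cellsL]
    exact List.mem_flatMap.2 ⟨p.1, (PySem.List.mem_pyRange_one).2 ⟨h1, h2⟩,
      List.mem_map.2 ⟨p.2, (PySem.List.mem_pyRange_one).2 ⟨h3, h4⟩, rfl⟩⟩

lemma nodup_cellsL : cellsL.Nodup := by decide

lemma mem_U25 (p : Int × Int) : p ∈ U25 ↔ inb p := by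
  simp [U25, mem_cellsL]

lemma card_U25 : U25.card = 25 := by decide

-- ---- value-v expansion and components ----

def okB (grid : List (List Int)) (v : Int) (q : Int × Int) : Bool :=
  decide (0 ≤ q.1 ∧ q.1 < 5 ∧ 0 ≤ q.2 ∧ q.2 < 5 ∧ gget grid q.1 q.2 = v)

lemma okB_iff (grid : List (List Int)) (v : Int) (q : Int × Int) :
    okB grid v q = true ↔ inb q ∧ gget grid q.1 q.2 = v := by
  simp [okB, inb, and_assoc]

def expandv (grid : List (List Int)) (v : Int) (S : Finset (Int × Int)) : Finset (Int × Int) :=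
  S ∪ S.biUnion (fun p => ((nbrs p).filter (okB grid v)).toFinset)

def compv (grid : List (List Int)) (v : Int) (s : Int × Int) : Finset (Int × Int) :=
  (expandv grid v)^[25] {s}

-- component of a nonzero cell, at its own value
def C (grid : List (List Int)) (x : Int × Int) : Finset (Int × Int) :=
  compv grid (gget grid x.1 x.2) x

lemma mem_expandv (grid : List (List Int)) (v : Int) (S : Finset (Int × Int)) (x : Int × Int) :
    x ∈ expandv grid v S ↔ x ∈ S ∨ ∃ p ∈ S, x ∈ nbrs p ∧ inb x ∧ gget grid x.1 x.2 = v := by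
  simp [expandv, okB_iff]

lemma subset_expandv (grid : List (List Int)) (v : Int) (S : Finset (Int × Int)) :
    S ⊆ expandv grid v S := Finset.subset_union_left

lemma mem_nbrs_symm (p q : Int × Int) : q ∈ nbrs p ↔ p ∈ nbrs q := by
  rcases p with ⟨a, b⟩; rcases q with ⟨c, d⟩
  simp only [nbrs, List.mem_cons, List.not_mem_nil, or_false, Prod.mk.injEq]
  omega

-- every iterate contains the start
lemma self_mem_iter (grid : List (List Int)) (v : Int) (s : Int × Int) (n : Nat) :
    s ∈ (expandv grid v)^[n] {s} := by
  induction n with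
  | zero => simp
  | succ n ih =>
      rw [Function.iterate_succ_apply']
      exact subset_expandv _ _ _ ih

lemma self_mem_compv (grid : List (List Int)) (v : Int) (s : Int × Int) :
    s ∈ compv grid v s := self_mem_iter grid v s 25

-- all iterate members are on the board with value v (when the start is)
lemma iter_vals (grid : List (List Int)) (v : Int) (s : Int × Int)
    (hin : inb s) (hv : gget grid s.1 s.2 = v) (n : Nat) :
    ∀ x ∈ (expandv grid v)^[n] {s}, inb x ∧ gget grid x.1 x.2 = v := by
  induction n with
  | zero =>
      intro x hx
      rw [Function.iterate_zero_apply, Finset.mem_singleton] at hx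
      rw [hx]; exact ⟨hin, hv⟩
  | succ n ih =>
      rw [Function.iterate_succ_apply']
      intro x hx
      rcases (mem_expandv _ _ _ _).1 hx with h | ⟨p, _, _, h1, h2⟩
      · exact ih x h
      · exact ⟨h1, h2⟩

lemma compv_vals (grid : List (List Int)) (v : Int) (s : Int × Int)
    (hin : inb s) (hv : gget grid s.1 s.2 = v) :
    ∀ x ∈ compv grid v s, inb x ∧ gget grid x.1 x.2 = v :=
  iter_vals grid v s hin hv 25

lemma iter_subset_U25 (grid : List (List Int)) (v : Int) (s : Int × Int)
    (hin : inb s) (n : Nat) :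
    (expandv grid v)^[n] {s} ⊆ U25 := by
  induction n with
  | zero =>
      intro x hx
      rw [Function.iterate_zero_apply, Finset.mem_singleton] at hx
      rw [hx]; exact (mem_U25 s).2 hin
  | succ n ih =>
      rw [Function.iterate_succ_apply']
      intro x hx
      rcases (mem_expandv _ _ _ _).1 hx with h | ⟨p, _, _, h1, _⟩
      · exact ih h
      · exact (mem_U25 x).2 h1

-- the fixed point is reached within 25 rounds
lemma iter_fix_or_card (grid : List (List Int)) (v : Int) (s : Int × Int) :
    ∀ n : Nat, expandv grid v ((expandv grid v)^[n] {s}) = (expandv grid v)^[n] {s} ∨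
      n + 1 ≤ ((expandv grid v)^[n] {s}).card := by
  intro n
  induction n with
  | zero => right; simp
  | succ n ih =>
      rw [Function.iterate_succ_apply']
      rcases ih with h | h
      · left; rw [h]; exact h
      · by_cases he : expandv grid v ((expandv grid v)^[n] {s}) = (expandv grid v)^[n] {s}
        · left; rw [he]; exact he
        · right
          have hsub := subset_expandv grid v ((expandv grid v)^[n] {s})
          have : ((expandv grid v)^[n] {s}).card < (expandv grid v ((expandv grid v)^[n] {s})).card :=
            Finset.card_lt_card (lt_of_le_of_ne hsub (fun hh => he hh.symm))
          omega

lemma expandv_compv (grid : List (List Int)) (v : Int) (s : Int × Int) (hin : inb s) :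
    expandv grid v (compv grid v s) = compv grid v s := by
  rcases iter_fix_or_card grid v s 25 with h | h
  · exact h
  · exfalso
    have hle : ((expandv grid v)^[25] {s}).card ≤ 25 := by
      have := Finset.card_le_card (iter_subset_U25 grid v s hin 25)
      rwa [card_U25] at this
    omega

-- closure of compv: a (v-guarded) closed superset of {s} contains compv
lemma compv_min (grid : List (List Int)) (v : Int) (s : Int × Int)
    (hin : inb s) (hv : gget grid s.1 s.2 = v) (T : Finset (Int × Int))
    (hT : ∀ p ∈ T, gget grid p.1 p.2 = v → ∀ q ∈ nbrs p, inb q → gget grid q.1 q.2 = v → q ∈ T)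
    (hs : s ∈ T) : compv grid v s ⊆ T := by
  have : ∀ n : Nat, (expandv grid v)^[n] {s} ⊆ T := by
    intro n
    induction n with
    | zero =>
      intro x hx
      rw [Function.iterate_zero_apply, Finset.mem_singleton] at hx
      rw [hx]; exact hs
    | succ n ih =>
        rw [Function.iterate_succ_apply']
        intro x hx
        rcases (mem_expandv _ _ _ _).1 hx with h | ⟨p, hp, hnb, h1, h2⟩
        · exact ih h
        · have hpv := iter_vals grid v s hin hv n p hp
          exact hT p (ih hp) hpv.2 x hnb h1 h2
  exact this 25

-- compv is closed: a neighbour with value v of a member is a member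
lemma compv_closed (grid : List (List Int)) (v : Int) (s : Int × Int) (hin : inb s)
    (p : Int × Int) (hp : p ∈ compv grid v s) (q : Int × Int)
    (hq : q ∈ nbrs p) (hqin : inb q) (hqv : gget grid q.1 q.2 = v) :
    q ∈ compv grid v s := by
  have : q ∈ expandv grid v (compv grid v s) := by
    rw [mem_expandv]
    exact Or.inr ⟨p, hp, hq, hqin, hqv⟩
  rwa [expandv_compv grid v s hin] at this

-- symmetry: members see the start in their own component
lemma compv_symm (grid : List (List Int)) (v : Int) (s : Int × Int)
    (hin : inb s) (hv : gget grid s.1 s.2 = v) :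
    ∀ y ∈ compv grid v s, s ∈ compv grid v y := by
  have : ∀ n : Nat, ∀ y ∈ (expandv grid v)^[n] {s}, s ∈ compv grid v y := by
    intro n
    induction n with
    | zero =>
        intro y hy
        rw [Function.iterate_zero_apply, Finset.mem_singleton] at hy
        rw [hy]; exact self_mem_compv grid v s
    | succ n ih =>
        rw [Function.iterate_succ_apply']
        intro y hy
        rcases (mem_expandv _ _ _ _).1 hy with h | ⟨p, hp, hnb, hyin, hyv⟩
        · exact ih y h
        · have hpv := iter_vals grid v s hin hv n p hp
          -- p is a v-neighbour of y, hence in compv y; then compv p ⊆ compv y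
          have hpy : p ∈ compv grid v y :=
            compv_closed grid v y hyin (y) (self_mem_compv grid v y) p
              ((mem_nbrs_symm p y).1 hnb) hpv.1 hpv.2
          have hsub : compv grid v p ⊆ compv grid v y := by
            apply compv_min grid v p hpv.1 hpv.2
            · intro a ha hav q hq hqin hqv
              exact compv_closed grid v y hyin a ha q hq hqin hqv
            · exact hpy
          exact hsub (ih p hp)
  exact this 25

-- members have the same component
lemma compv_class (grid : List (List Int)) (v : Int) (s : Int × Int)
    (hin : inb s) (hv : gget grid s.1 s.2 = v) :
    ∀ y ∈ compv grid v s, compv grid v y = compv grid v s := by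
  intro y hy
  have hyv := compv_vals grid v s hin hv y hy
  apply Finset.Subset.antisymm
  · apply compv_min grid v y hyv.1 hyv.2
    · intro a ha hav q hq hqin hqv
      exact compv_closed grid v s hin a ha q hq hqin hqv
    · exact hy
  · apply compv_min grid v s hin hv
    · intro a ha hav q hq hqin hqv
      exact compv_closed grid v y hyv.1 a ha q hq hqin hqv
    · exact compv_symm grid v s hin hv y hy

-- ---- visited matrix bridge ----

def ShapeV (v : List (List Bool)) : Prop := v.length = 5 ∧ ∀ r ∈ v, r.length = 5

def trueW (v : List (List Bool)) : Finset (Int × Int) :=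
  (cellsL.filter (fun p => vget v p.1 p.2)).toFinset

lemma mem_trueW (v : List (List Bool)) (p : Int × Int) :
    p ∈ trueW v ↔ inb p ∧ vget v p.1 p.2 = true := by
  simp [trueW, mem_cellsL]

lemma trueW_subset_U25 (v : List (List Bool)) : trueW v ⊆ U25 := by
  intro p hp
  exact (mem_U25 p).2 ((mem_trueW v p).1 hp).1

lemma vget_eq_getD (v : List (List Bool)) (i j : Int) (hi : 0 ≤ i) (hj : 0 ≤ j) :
    vget v i j = (v.getD i.toNat []).getD j.toNat false := by
  unfold vget
  rw [PySem.List.pyGetD_of_nonneg _ _ hi, PySem.List.pyGetD_of_nonneg _ _ hj]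

lemma vset_eq_set (v : List (List Bool)) (a b : Int) (ha : 0 ≤ a) (hb : 0 ≤ b) :
    vset v a b = v.set a.toNat ((v.getD a.toNat []).set b.toNat true) := by
  unfold vset
  rw [PySem.List.pySetD_of_nonneg _ _ ha,
      PySem.List.pySetD_of_nonneg _ _ hb,
      PySem.List.pyGetD_of_nonneg _ _ ha]

lemma shapeV_vset (v : List (List Bool)) (hs : ShapeV v) (a b : Int)
    (ha : 0 ≤ a) (hb : 0 ≤ b) (ha5 : a < 5) (hb5 : b < 5) : ShapeV (vset v a b) := by
  rcases hs with ⟨hl, hr⟩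
  rw [vset_eq_set v a b ha hb]
  refine ⟨by simpa using hl, ?_⟩
  intro r hrm
  rcases List.mem_or_eq_of_mem_set hrm with h | h
  · exact hr r h
  · subst h
    rw [List.length_set]
    apply hr
    have hlt : a.toNat < v.length := by omega
    rw [List.getD_eq_getElem v [] hlt]
    exact List.getElem_mem hlt

lemma vget_vset (v : List (List Bool)) (hs : ShapeV v) (a b i j : Int)
    (ha : 0 ≤ a) (hb : 0 ≤ b) (ha5 : a < 5) (hb5 : b < 5)
    (hi : 0 ≤ i) (hj : 0 ≤ j) (hi5 : i < 5) (hj5 : j < 5) :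
    vget (vset v a b) i j = if i = a ∧ j = b then true else vget v i j := by
  rcases hs with ⟨hl, hr⟩
  rw [vset_eq_set v a b ha hb, vget_eq_getD _ i j hi hj, vget_eq_getD v i j hi hj]
  have hia : a.toNat < v.length := by omega
  by_cases hA : i = a
  · subst hA
    have hii : i.toNat < (v.set i.toNat ((v.getD i.toNat []).set b.toNat true)).length := by
      rw [List.length_set]; exact hia
    rw [List.getD_eq_getElem _ [] hii, List.getElem_set_self hii, List.getD_eq_getElem v [] hia]
    have hrowlen : (v[i.toNat]'hia).length = 5 := hr _ (List.getElem_mem hia)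
    by_cases hB : j = b
    · subst hB
      rw [if_pos ⟨rfl, rfl⟩]
      have h2 : j.toNat < ((v[i.toNat]'hia).set j.toNat true).length := by
        rw [List.length_set, hrowlen]; omega
      rw [List.getD_eq_getElem _ false h2, List.getElem_set_self h2]
    · rw [if_neg (by tauto : ¬ (i = i ∧ j = b))]
      by_cases hjb : j.toNat < (v[i.toNat]'hia).length
      · rw [List.getD_eq_getElem _ false (by rw [List.length_set]; exact hjb),
            List.getElem_set_ne (by omega), List.getD_eq_getElem _ false hjb]
      · rw [List.getD_eq_default _ false (by rw [List.length_set]; omega),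
            List.getD_eq_default _ false (by omega)]
  · rw [if_neg (by tauto : ¬ (i = a ∧ j = b))]
    by_cases hil : i.toNat < v.length
    · rw [List.getD_eq_getElem _ [] (by rw [List.length_set]; exact hil),
          List.getElem_set_ne (by omega), List.getD_eq_getElem v [] hil]
    · rw [List.getD_eq_default _ [] (by rw [List.length_set]; omega),
          List.getD_eq_default v [] (by omega)]

lemma trueW_vset (v : List (List Bool)) (hs : ShapeV v) (a b : Int)
    (hab : inb (a, b)) : trueW (vset v a b) = insert (a, b) (trueW v) := by
  rcases hab with ⟨ha, ha5, hb, hb5⟩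
  ext p
  rcases p with ⟨i, j⟩
  by_cases hin : inb (i, j)
  · rcases hin with ⟨hi, hi5, hj, hj5⟩
    rw [mem_trueW, Finset.mem_insert, mem_trueW,
        vget_vset v hs a b i j ha hb ha5 hb5 hi hj hi5 hj5]
    by_cases h : i = a ∧ j = b
    · rcases h with ⟨h1, h2⟩; subst h1; subst h2
      simp [inb, *]
    · have : ¬ ((i, j) = (a, b)) := by simp [Prod.ext_iff]; tauto
      simp [inb, *]
  · rw [mem_trueW, Finset.mem_insert, mem_trueW]
    have : ¬ ((i, j) = (a, b)) := by
      intro hEq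
      injection hEq with e1 e2
      subst e1; subst e2
      exact hin ⟨ha, ha5, hb, hb5⟩
    simp [hin, this]

-- ---- the closed-visited invariant of A's outer loop ----

def GoodW (grid : List (List Int)) (W : Finset (Int × Int)) : Prop :=
  ∀ p ∈ W, inb p ∧ gget grid p.1 p.2 ≠ 0 ∧
    ∀ q ∈ nbrs p, inb q → gget grid q.1 q.2 = gget grid p.1 p.2 → q ∈ W

-- a good visited set is disjoint from the component of a fresh cell
lemma goodW_disjoint (grid : List (List Int)) (W : Finset (Int × Int)) (hW : GoodW grid W)
    (s : Int × Int) (hin : inb s) (hs : s ∉ W) :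
    ∀ z ∈ compv grid (gget grid s.1 s.2) s, z ∉ W := by
  intro z hz hzW
  have hzv := compv_vals grid _ s hin rfl z hz
  have hsub : compv grid (gget grid s.1 s.2) z ⊆ W := by
    apply compv_min grid _ z hzv.1 hzv.2
    · intro p hp hpv q hq hqin hqv
      exact ((hW p hp).2.2 q hq hqin (by rw [hqv, hpv]))
    · exact hzW
  exact hs (hsub (compv_symm grid _ s hin rfl z hz))

-- GoodW is preserved by adding a whole nonzero component
lemma goodW_union_comp (grid : List (List Int)) (W : Finset (Int × Int)) (hW : GoodW grid W)
    (s : Int × Int) (hin : inb s) (hnz : gget grid s.1 s.2 ≠ 0) :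
    GoodW grid (W ∪ compv grid (gget grid s.1 s.2) s) := by
  intro p hp
  rcases Finset.mem_union.1 hp with h | h
  · obtain ⟨h1, h2, h3⟩ := hW p h
    exact ⟨h1, h2, fun q hq hqin hqv => Finset.mem_union_left _ (h3 q hq hqin hqv)⟩
  · obtain ⟨h1, h2⟩ := compv_vals grid _ s hin rfl p h
    refine ⟨h1, by rw [h2]; exact hnz, ?_⟩
    intro q hq hqin hqv
    exact Finset.mem_union_right _
      (compv_closed grid _ s hin p h q hq hqin (by rw [hqv, h2]))

-- ---- BFS: the direction pass ----

lemma toFinset_setAdd (acc : List (Int × Int)) (n : Int × Int) :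
    (PySem.Set.add acc n).toFinset = insert n acc.toFinset := by
  ext x
  simp [PySem.Set.mem_add]
  tauto

lemma mem_nbrs_iff (x c : Int × Int) :
    x ∈ nbrs c ↔ ∃ dd ∈ dirs, x = (c.1 + dd.1, c.2 + dd.2) := by
  have e1 : (c.1 - 1, c.2) = (c.1 + (-1 : Int), c.2 + (0 : Int)) := by
    simp [sub_eq_add_neg]
  have e2 : (c.1 + 1, c.2) = (c.1 + (1 : Int), c.2 + (0 : Int)) := by simp
  have e3 : (c.1, c.2 - 1) = (c.1 + (0 : Int), c.2 + (-1 : Int)) := by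
    simp [sub_eq_add_neg]
  have e4 : (c.1, c.2 + 1) = (c.1 + (0 : Int), c.2 + (1 : Int)) := by simp
  constructor
  · intro h
    simp only [nbrs, List.mem_cons, List.not_mem_nil, or_false] at h
    rcases h with rfl | rfl | rfl | rfl
    · exact ⟨(-1, 0), by simp [dirs], e1⟩
    · exact ⟨(1, 0), by simp [dirs], e2⟩
    · exact ⟨(0, -1), by simp [dirs], e3⟩
    · exact ⟨(0, 1), by simp [dirs], e4⟩
  · rintro ⟨dd, hdd, rfl⟩
    simp only [dirs, List.mem_cons, List.not_mem_nil, or_false] at hdd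
    rcases hdd with rfl | rfl | rfl | rfl
    · rw [← e1]; simp [nbrs]
    · rw [← e2]; simp [nbrs]
    · rw [← e3]; simp [nbrs]
    · rw [← e4]; simp [nbrs]

lemma dstep (grid : List (List Int)) (value : Int) (c : Int × Int) :
    ∀ (ds : List (Int × Int)) (q0 : List (Int × Int)) (vis : List (List Bool))
      (con : List (Int × Int)),
      ShapeV vis → con.Nodup → (∀ x ∈ con, x ∈ trueW vis) →
      ∃ delta : List (Int × Int),
        (ds.foldl (bfsStep grid value c) (q0, vis, con)).1 = q0 ++ delta ∧
        (ds.foldl (bfsStep grid value c) (q0, vis, con)).2.2 = con ++ delta ∧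
        ShapeV (ds.foldl (bfsStep grid value c) (q0, vis, con)).2.1 ∧
        (con ++ delta).Nodup ∧
        trueW (ds.foldl (bfsStep grid value c) (q0, vis, con)).2.1 = trueW vis ∪ delta.toFinset ∧
        (∀ x ∈ delta, (∃ dd ∈ ds, x = (c.1 + dd.1, c.2 + dd.2)) ∧ inb x ∧
          gget grid x.1 x.2 = value ∧ x ∉ trueW vis) ∧
        (trueW (ds.foldl (bfsStep grid value c) (q0, vis, con)).2.1).card
          = (trueW vis).card + delta.length ∧
        (∀ x ∈ con ++ delta, x ∈ trueW (ds.foldl (bfsStep grid value c) (q0, vis, con)).2.1) ∧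
        (∀ dd ∈ ds, inb (c.1 + dd.1, c.2 + dd.2) →
          gget grid (c.1 + dd.1) (c.2 + dd.2) = value →
          (c.1 + dd.1, c.2 + dd.2) ∈ trueW (ds.foldl (bfsStep grid value c) (q0, vis, con)).2.1) := by
  intro ds
  induction ds with
  | nil =>
      intro q0 vis con hs hn hsub
      exact ⟨[], by simp, by simp, hs, by simpa using hn, by simp, by simp, by simp,
        by simpa using hsub, by simp⟩
  | cons dd ds ih =>
      intro q0 vis con hs hn hsub
      rw [List.foldl_cons]
      by_cases hc : 0 ≤ c.1 + dd.1 ∧ c.1 + dd.1 < 5 ∧ 0 ≤ c.2 + dd.2 ∧ c.2 + dd.2 < 5 ∧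
          vget vis (c.1 + dd.1) (c.2 + dd.2) = false ∧ gget grid (c.1 + dd.1) (c.2 + dd.2) = value
      · have hstep : bfsStep grid value c (q0, vis, con) dd
            = (q0 ++ [(c.1 + dd.1, c.2 + dd.2)],
               vset vis (c.1 + dd.1) (c.2 + dd.2),
               PySem.Set.add con (c.1 + dd.1, c.2 + dd.2)) := by
          simp only [bfsStep]
          rw [if_pos hc]
        obtain ⟨h1, h2, h3, h4, hnv, hgv⟩ := hc
        have hninb : inb (c.1 + dd.1, c.2 + dd.2) := ⟨h1, h2, h3, h4⟩
        have hnW : (c.1 + dd.1, c.2 + dd.2) ∉ trueW vis := by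
          simp [mem_trueW, hnv]
        have hncon : (c.1 + dd.1, c.2 + dd.2) ∉ con := fun hm => hnW (hsub _ hm)
        have hadd : PySem.Set.add con (c.1 + dd.1, c.2 + dd.2)
            = con ++ [(c.1 + dd.1, c.2 + dd.2)] := PySem.Set.add_of_not_mem hncon
        have hs' : ShapeV (vset vis (c.1 + dd.1) (c.2 + dd.2)) :=
          shapeV_vset vis hs _ _ h1 h3 h2 h4
        have htw : trueW (vset vis (c.1 + dd.1) (c.2 + dd.2))
            = insert (c.1 + dd.1, c.2 + dd.2) (trueW vis) := trueW_vset vis hs _ _ hninb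
        have hn' : (con ++ [(c.1 + dd.1, c.2 + dd.2)]).Nodup := by
          rw [List.nodup_append]
          refine ⟨hn, List.nodup_singleton _, ?_⟩
          intro a ha b hb
          rw [List.mem_singleton] at hb
          subst hb
          exact fun h => hncon (h ▸ ha)
        have hsub' : ∀ x ∈ con ++ [(c.1 + dd.1, c.2 + dd.2)],
            x ∈ trueW (vset vis (c.1 + dd.1) (c.2 + dd.2)) := by
          intro x hx
          rw [htw, Finset.mem_insert]
          rcases List.mem_append.1 hx with h | h
          · exact Or.inr (hsub x h)
          · rw [List.mem_singleton] at h
            exact Or.inl h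
        rw [hstep, hadd]
        obtain ⟨delta, p1, p2, p3, p4, p5, p6, p7, p8, p9⟩ :=
          ih (q0 ++ [(c.1 + dd.1, c.2 + dd.2)]) (vset vis (c.1 + dd.1) (c.2 + dd.2))
            (con ++ [(c.1 + dd.1, c.2 + dd.2)]) hs' hn' hsub'
        refine ⟨(c.1 + dd.1, c.2 + dd.2) :: delta, ?_, ?_, p3, ?_, ?_, ?_, ?_, ?_, ?_⟩
        · rw [p1, List.append_assoc, List.singleton_append]
        · rw [p2, List.append_assoc, List.singleton_append]
        · rw [List.append_assoc, List.singleton_append] at p4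
          exact p4
        · rw [p5, htw, List.toFinset_cons, Finset.insert_union, Finset.union_insert]
        · intro x hx
          rcases List.mem_cons.1 hx with rfl | hx'
          · exact ⟨⟨dd, List.mem_cons_self, rfl⟩, hninb, hgv, hnW⟩
          · obtain ⟨⟨dd', hdd', hxe⟩, hinb', hval', hnW'⟩ := p6 x hx'
            refine ⟨⟨dd', List.mem_cons_of_mem _ hdd', hxe⟩, hinb', hval', ?_⟩
            intro hmem
            exact hnW' (by rw [htw]; exact Finset.mem_insert_of_mem hmem)
        · rw [p7, htw, Finset.card_insert_of_notMem hnW, List.length_cons]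
          omega
        · intro x hx
          apply p8
          rw [List.append_assoc, List.singleton_append]
          exact hx
        · intro dd2 hdd2 hinb2 hval2
          rcases List.mem_cons.1 hdd2 with rfl | hdd2'
          · apply p8
            exact List.mem_append.2 (Or.inl (List.mem_append.2 (Or.inr (List.mem_singleton.2 rfl))))
          · exact p9 dd2 hdd2' hinb2 hval2
      · have hstep : bfsStep grid value c (q0, vis, con) dd = (q0, vis, con) := by
          simp only [bfsStep]
          rw [if_neg hc]
        rw [hstep]
        obtain ⟨delta, p1, p2, p3, p4, p5, p6, p7, p8, p9⟩ := ih q0 vis con hs hn hsub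
        refine ⟨delta, p1, p2, p3, p4, p5, ?_, p7, p8, ?_⟩
        · intro x hx
          obtain ⟨⟨dd', hdd', hxe⟩, rest⟩ := p6 x hx
          exact ⟨⟨dd', List.mem_cons_of_mem _ hdd', hxe⟩, rest⟩
        · intro dd2 hdd2 hinb2 hval2
          rcases List.mem_cons.1 hdd2 with rfl | hdd2'
          · obtain ⟨a1, a2, a3, a4⟩ := hinb2
            cases hvv : vget vis (c.1 + dd2.1) (c.2 + dd2.2) with
            | false => exact absurd ⟨a1, a2, a3, a4, hvv, hval2⟩ hc
            | true =>
                rw [p5]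
                apply Finset.mem_union_left
                rw [mem_trueW]
                exact ⟨⟨a1, a2, a3, a4⟩, hvv⟩
          · exact p9 dd2 hdd2' hinb2 hval2

-- ---- BFS: the final (empty-queue) state ----

lemma bfs_end (grid : List (List Int)) (value : Int) (s : Int × Int)
    (V0 : Finset (Int × Int)) (hin : inb s) (hval : gget grid s.1 s.2 = value)
    (hdisj : ∀ z ∈ compv grid value s, z ∉ V0)
    (vis : List (List Bool)) (con : List (Int × Int))
    (htw : trueW vis = V0 ∪ con.toFinset)
    (hsubc : con.toFinset ⊆ compv grid value s)
    (hscon : s ∈ con)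
    (hclo : ∀ p ∈ con, ∀ q ∈ nbrs p, inb q → gget grid q.1 q.2 = value → q ∈ trueW vis) :
    con.toFinset = compv grid value s ∧ trueW vis = V0 ∪ compv grid value s := by
  have hcs : compv grid value s ⊆ con.toFinset := by
    apply compv_min grid value s hin hval
    · intro p hp hpv q hq hqin hqv
      have hqW : q ∈ trueW vis := hclo p (List.mem_toFinset.1 hp) q hq hqin hqv
      have hqcomp : q ∈ compv grid value s :=
        compv_closed grid value s hin p (hsubc hp) q hq hqin hqv
      rw [htw, Finset.mem_union] at hqW
      rcases hqW with h | h
      · exact absurd h (hdisj q hqcomp)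
      · exact h
    · exact List.mem_toFinset.2 hscon
  have he : con.toFinset = compv grid value s := Finset.Subset.antisymm hsubc hcs
  exact ⟨he, by rw [htw, he]⟩

-- ---- BFS: the queue loop ----

lemma bfsLoop_spec (grid : List (List Int)) (value : Int) (s : Int × Int)
    (V0 : Finset (Int × Int)) (hin : inb s) (hval : gget grid s.1 s.2 = value)
    (hdisj : ∀ z ∈ compv grid value s, z ∉ V0) :
    ∀ (fuel : Nat) (Q con : List (Int × Int)) (vis : List (List Bool)),
      ShapeV vis → con.Nodup →
      trueW vis = V0 ∪ con.toFinset →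
      (∀ x ∈ Q, x ∈ con) →
      con.toFinset ⊆ compv grid value s →
      s ∈ con →
      (∀ p ∈ con, p ∉ Q → ∀ q ∈ nbrs p, inb q → gget grid q.1 q.2 = value → q ∈ trueW vis) →
      2 * (25 - (trueW vis).card) + Q.length ≤ fuel →
      ShapeV (bfsLoop grid value fuel Q vis con).1 ∧
      (bfsLoop grid value fuel Q vis con).2.toFinset = compv grid value s ∧
      (bfsLoop grid value fuel Q vis con).2.Nodup ∧
      trueW (bfsLoop grid value fuel Q vis con).1 = V0 ∪ compv grid value s := by
  intro fuel
  induction fuel with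
  | zero =>
      intro Q con vis hs hn htw hQcon hsubc hscon hclo hfuel
      have hQ : Q = [] := by
        cases Q with
        | nil => rfl
        | cons a t => simp [List.length_cons] at hfuel
      subst hQ
      have hunf : bfsLoop grid value 0 [] vis con = (vis, con) := rfl
      rw [hunf]
      obtain ⟨he, ht⟩ := bfs_end grid value s V0 hin hval hdisj vis con htw hsubc hscon
        (fun p hp => hclo p hp (by simp))
      exact ⟨hs, he, hn, ht⟩
  | succ fuel ih =>
      intro Q con vis hs hn htw hQcon hsubc hscon hclo hfuel
      cases Q with
      | nil =>
          have hunf : bfsLoop grid value (fuel + 1) [] vis con = (vis, con) := rfl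
          rw [hunf]
          obtain ⟨he, ht⟩ := bfs_end grid value s V0 hin hval hdisj vis con htw hsubc hscon
            (fun p hp => hclo p hp (by simp))
          exact ⟨hs, he, hn, ht⟩
      | cons c rest =>
          have hunf : bfsLoop grid value (fuel + 1) (c :: rest) vis con
              = bfsLoop grid value fuel
                  (dirs.foldl (bfsStep grid value c) (rest, vis, con)).1
                  (dirs.foldl (bfsStep grid value c) (rest, vis, con)).2.1
                  (dirs.foldl (bfsStep grid value c) (rest, vis, con)).2.2 := rfl
          rw [hunf]
          have hsubW : ∀ x ∈ con, x ∈ trueW vis := by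
            intro x hx
            rw [htw]
            exact Finset.mem_union_right _ (List.mem_toFinset.2 hx)
          obtain ⟨delta, p1, p2, p3, p4, p5, p6, p7, p8, p9⟩ :=
            dstep grid value c dirs rest vis con hs hn hsubW
          rw [p1, p2]
          have hccomp : c ∈ compv grid value s :=
            hsubc (List.mem_toFinset.2 (hQcon c List.mem_cons_self))
          have hV0W : V0 ⊆ trueW vis := by
            rw [htw]; exact Finset.subset_union_left
          apply ih (rest ++ delta) (con ++ delta)
            (dirs.foldl (bfsStep grid value c) (rest, vis, con)).2.1 p3 p4
          · rw [p5, htw, List.toFinset_append, Finset.union_assoc]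
          · intro x hx
            rcases List.mem_append.1 hx with h | h
            · exact List.mem_append.2 (Or.inl (hQcon x (List.mem_cons_of_mem _ h)))
            · exact List.mem_append.2 (Or.inr h)
          · intro x hx
            rw [List.toFinset_append, Finset.mem_union] at hx
            rcases hx with h | h
            · exact hsubc h
            · rw [List.mem_toFinset] at h
              obtain ⟨⟨dd, hdd, hxe⟩, hinb', hval', -⟩ := p6 x h
              exact compv_closed grid value s hin c hccomp x
                ((mem_nbrs_iff x c).2 ⟨dd, hdd, hxe⟩) hinb' hval'
          · exact List.mem_append.2 (Or.inl hscon)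
          · intro p hp hpn q hq hqin hqv
            rcases List.mem_append.1 hp with hpc | hpd
            · by_cases hpceq : p = c
              · subst hpceq
                obtain ⟨dd, hdd, hqe⟩ := (mem_nbrs_iff q p).1 hq
                have := p9 dd hdd (hqe ▸ hqin) (by rw [hqe] at hqv; exact hqv)
                rwa [← hqe] at this
              · have hpnQ : p ∉ c :: rest := by
                  intro hmem
                  rcases List.mem_cons.1 hmem with h | h
                  · exact hpceq h
                  · exact hpn (List.mem_append.2 (Or.inl h))
                have := hclo p hpc hpnQ q hq hqin hqv
                rw [p5]
                exact Finset.mem_union_left _ this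
            · exact absurd (List.mem_append.2 (Or.inr hpd)) hpn
          · have hb : (trueW (dirs.foldl (bfsStep grid value c) (rest, vis, con)).2.1).card ≤ 25 := by
              have := Finset.card_le_card
                (trueW_subset_U25 (dirs.foldl (bfsStep grid value c) (rest, vis, con)).2.1)
              rwa [card_U25] at this
            rw [List.length_append]
            simp only [List.length_cons] at hfuel
            omega

-- ---- A's bfs call ----

lemma bfs_spec (grid : List (List Int)) (d : Int × Int) (flag : Int)
    (vis : List (List Bool)) (hs : ShapeV vis) (hGood : GoodW grid (trueW vis))
    (hin : inb d) (hnz : gget grid d.1 d.2 ≠ 0) (hnv : vget vis d.1 d.2 = false) :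
    ShapeV (bfs grid d.1 d.2 flag vis).2 ∧
    trueW (bfs grid d.1 d.2 flag vis).2 = trueW vis ∪ C grid d ∧
    (bfs grid d.1 d.2 flag vis).1
      = if 3 ≤ (C grid d).card then ((C grid d).card : Int) else 0 := by
  have hdW : d ∉ trueW vis := by
    rw [mem_trueW]
    rintro ⟨-, h⟩
    rw [hnv] at h
    cases h
  have hdisj := goodW_disjoint grid (trueW vis) hGood d hin hdW
  obtain ⟨q1, q2, q3, q4⟩ := bfsLoop_spec grid (gget grid d.1 d.2) d (trueW vis) hin rfl hdisj
    64 [(d.1, d.2)] [(d.1, d.2)] (vset vis d.1 d.2)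
    (shapeV_vset vis hs d.1 d.2 hin.1 hin.2.2.1 hin.2.1 hin.2.2.2)
    (List.nodup_singleton _)
    (by
      rw [trueW_vset vis hs d.1 d.2 hin]
      ext x
      simp)
    (fun x hx => hx)
    (by
      intro x hx
      rw [List.mem_toFinset, List.mem_singleton] at hx
      subst hx
      exact self_mem_compv grid _ _)
    (List.mem_singleton.2 rfl)
    (by
      intro p hp hpn
      exact absurd hp hpn)
    (by simp only [List.length_cons, List.length_nil]; omega)
  refine ⟨q1, ?_, ?_⟩
  · exact q4
  · have hlen : (bfsLoop grid (gget grid d.1 d.2) 64 [(d.1, d.2)] (vset vis d.1 d.2)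
        [(d.1, d.2)]).2.length = (C grid d).card := by
      have := List.toFinset_card_of_nodup q3
      rw [q2] at this
      exact this.symm
    show (if 3 ≤ (bfsLoop grid (gget grid d.1 d.2) 64 [(d.1, d.2)] (vset vis d.1 d.2)
        [(d.1, d.2)]).2.length then
          ((bfsLoop grid (gget grid d.1 d.2) 64 [(d.1, d.2)] (vset vis d.1 d.2)
            [(d.1, d.2)]).2.length : Int) else 0) = _
    rw [hlen]

-- ---- A's outer loop ----

def stepA (grid : List (List Int)) (flag : Int) (st : List (List Bool) × Int)
    (p : Int × Int) : List (List Bool) × Int :=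
  if vget st.1 p.1 p.2 = false ∧ gget grid p.1 p.2 ≠ 0 then
    let r := bfs grid p.1 p.2 flag st.1
    (r.2, st.2 + r.1)
  else st

lemma foldl_pair {σ : Type} (f : σ → Int × Int → σ) (is js : List Int) (init : σ) :
    (is.foldl (fun st i => js.foldl (fun st j => f st (i, j)) st) init)
      = (is.flatMap (fun i => js.map (fun j => (i, j)))).foldl f init := by
  induction is generalizing init with
  | nil => rfl
  | cons i is ih =>
      simp only [List.flatMap_cons, List.foldl_append, List.foldl_cons, List.foldl_map, ih]

lemma count_eq (grid : List (List Int)) (flag : Int) :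
    count grid flag = (cellsL.foldl (stepA grid flag)
      (List.replicate 5 (List.replicate 5 false), 0)).2 := by
  have h := foldl_pair (stepA grid flag) (PySem.List.pyRange 0 5 1) (PySem.List.pyRange 0 5 1)
    (List.replicate 5 (List.replicate 5 false), 0)
  exact congrArg (fun st : List (List Bool) × Int => st.2) h

lemma C_eq_of_mem (grid : List (List Int)) (d : Int × Int) (hind : inb d) :
    ∀ x ∈ C grid d, C grid x = C grid d := by
  intro x hx
  have hv := compv_vals grid _ d hind rfl x hx
  show compv grid (gget grid x.1 x.2) x = _
  rw [hv.2]
  exact compv_class grid _ d hind rfl x hx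

lemma filter_big_comp (grid : List (List Int)) (d : Int × Int) (hind : inb d) :
    (C grid d).filter (fun x => 3 ≤ (C grid x).card)
      = if 3 ≤ (C grid d).card then C grid d else ∅ := by
  by_cases h : 3 ≤ (C grid d).card
  · rw [if_pos h]
    apply Finset.filter_true_of_mem
    intro x hx
    rw [C_eq_of_mem grid d hind x hx]
    exact h
  · rw [if_neg h]
    apply Finset.filter_false_of_mem
    intro x hx
    rw [C_eq_of_mem grid d hind x hx]
    exact h

lemma comp_subset_goodW (grid : List (List Int)) (W : Finset (Int × Int)) (hW : GoodW grid W)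
    (d : Int × Int) (hind : inb d) (hd : d ∈ W) : C grid d ⊆ W := by
  apply compv_min grid _ d hind rfl
  · intro p hp hpv q hq hqin hqv
    exact (hW p hp).2.2 q hq hqin (by rw [hqv, hpv])
  · exact hd

lemma outer_inv (grid : List (List Int)) (flag : Int) :
    ∀ (L : List (Int × Int)) (vis : List (List Bool)) (total : Int),
      (∀ p ∈ L, inb p) → ShapeV vis → GoodW grid (trueW vis) →
      total = (((trueW vis).filter (fun x => 3 ≤ (C grid x).card)).card : Int) →
      ShapeV (L.foldl (stepA grid flag) (vis, total)).1 ∧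
      trueW (L.foldl (stepA grid flag) (vis, total)).1
        = trueW vis ∪ L.foldr (fun d acc =>
            (if gget grid d.1 d.2 ≠ 0 then C grid d else ∅) ∪ acc) ∅ ∧
      (L.foldl (stepA grid flag) (vis, total)).2
        = (((trueW (L.foldl (stepA grid flag) (vis, total)).1).filter
            (fun x => 3 ≤ (C grid x).card)).card : Int) := by
  intro L
  induction L with
  | nil =>
      intro vis total h1 h2 h3 h4
      exact ⟨h2, by simp, by simpa using h4⟩
  | cons d L ih =>
      intro vis total h1 h2 h3 h4
      have hind : inb d := h1 d List.mem_cons_self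
      rw [List.foldl_cons, List.foldr_cons]
      by_cases hc : vget vis d.1 d.2 = false ∧ gget grid d.1 d.2 ≠ 0
      · have hstep : stepA grid flag (vis, total) d
            = ((bfs grid d.1 d.2 flag vis).2, total + (bfs grid d.1 d.2 flag vis).1) := by
          unfold stepA
          rw [if_pos hc]
        rw [hstep]
        obtain ⟨b1, b2, b3⟩ := bfs_spec grid d flag vis h2 h3 hind hc.2 hc.1
        have hdW : d ∉ trueW vis := by
          rw [mem_trueW]
          rintro ⟨-, h⟩
          rw [hc.1] at h
          cases h
        have hdisj2 := goodW_disjoint grid (trueW vis) h3 d hind hdW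
        have hGood' : GoodW grid (trueW (bfs grid d.1 d.2 flag vis).2) := by
          rw [b2]
          exact goodW_union_comp grid (trueW vis) h3 d hind hc.2
        have htot' : total + (bfs grid d.1 d.2 flag vis).1
            = (((trueW (bfs grid d.1 d.2 flag vis).2).filter
                (fun x => 3 ≤ (C grid x).card)).card : Int) := by
          rw [b2, b3, Finset.filter_union, Finset.card_union_of_disjoint
            (by
              rw [Finset.disjoint_left]
              intro a ha hb
              exact hdisj2 a (Finset.mem_of_mem_filter a hb) (Finset.mem_of_mem_filter a ha)),
            filter_big_comp grid d hind, h4]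
          by_cases hbig : 3 ≤ (C grid d).card
          · rw [if_pos hbig, if_pos hbig]
            push_cast
            ring
          · rw [if_neg hbig, if_neg hbig]
            simp
        obtain ⟨o1, o2, o3⟩ := ih (bfs grid d.1 d.2 flag vis).2
          (total + (bfs grid d.1 d.2 flag vis).1)
          (fun p hp => h1 p (List.mem_cons_of_mem _ hp)) b1 hGood' htot'
        refine ⟨o1, ?_, o3⟩
        rw [o2, b2, if_pos hc.2, Finset.union_assoc]
      · have hstep : stepA grid flag (vis, total) d = (vis, total) := by
          unfold stepA
          rw [if_neg hc]
        rw [hstep]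
        obtain ⟨o1, o2, o3⟩ := ih vis total
          (fun p hp => h1 p (List.mem_cons_of_mem _ hp)) h2 h3 h4
        refine ⟨o1, ?_, o3⟩
        rw [o2]
        by_cases hz : gget grid d.1 d.2 ≠ 0
        · have hvt : vget vis d.1 d.2 = true := by
            cases hvv : vget vis d.1 d.2 with
            | false => exact absurd ⟨hvv, hz⟩ hc
            | true => rfl
          have hdmem : d ∈ trueW vis := by
            rw [mem_trueW]
            exact ⟨hind, hvt⟩
          have hsubW : C grid d ⊆ trueW vis := comp_subset_goodW grid (trueW vis) h3 d hind hdmem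
          rw [if_pos hz, ← Finset.union_assoc, Finset.union_eq_left.2 hsubW]
        · rw [if_neg hz, Finset.empty_union]

-- ---- B: component computes compv ----

lemma addfold_spec (grid : List (List Int)) (v : Int) (ns : List (Int × Int)) :
    ∀ acc : List (Int × Int), acc.Nodup →
      (ns.foldl (fun g n =>
        if 0 ≤ n.1 ∧ n.1 < 5 ∧ 0 ≤ n.2 ∧ n.2 < 5 ∧ gget grid n.1 n.2 = v
        then PySem.Set.add g n else g) acc).Nodup ∧
      (ns.foldl (fun g n =>
        if 0 ≤ n.1 ∧ n.1 < 5 ∧ 0 ≤ n.2 ∧ n.2 < 5 ∧ gget grid n.1 n.2 = v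
        then PySem.Set.add g n else g) acc).toFinset
        = acc.toFinset ∪ (ns.filter (okB grid v)).toFinset := by
  induction ns with
  | nil => intro acc hacc; exact ⟨hacc, by simp⟩
  | cons n ns ih =>
      intro acc hacc
      rw [List.foldl_cons]
      by_cases h : 0 ≤ n.1 ∧ n.1 < 5 ∧ 0 ≤ n.2 ∧ n.2 < 5 ∧ gget grid n.1 n.2 = v
      · rw [if_pos h]
        obtain ⟨h1, h2⟩ := ih (PySem.Set.add acc n) (PySem.Set.nodup_add acc n hacc)
        refine ⟨h1, ?_⟩
        rw [h2, toFinset_setAdd, List.filter_cons_of_pos (by simpa [okB] using h),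
          List.toFinset_cons, Finset.insert_union, Finset.union_insert]
      · rw [if_neg h]
        obtain ⟨h1, h2⟩ := ih acc hacc
        refine ⟨h1, ?_⟩
        rw [h2, List.filter_cons_of_neg (by simpa [okB] using h)]

lemma midfold_spec (grid : List (List Int)) (v : Int) (m : List (Int × Int)) :
    ∀ acc : List (Int × Int), acc.Nodup →
      (m.foldl (fun grown c =>
        (nbrs c).foldl (fun g n =>
          if 0 ≤ n.1 ∧ n.1 < 5 ∧ 0 ≤ n.2 ∧ n.2 < 5 ∧ gget grid n.1 n.2 = v
          then PySem.Set.add g n else g) grown) acc).Nodup ∧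
      (m.foldl (fun grown c =>
        (nbrs c).foldl (fun g n =>
          if 0 ≤ n.1 ∧ n.1 < 5 ∧ 0 ≤ n.2 ∧ n.2 < 5 ∧ gget grid n.1 n.2 = v
          then PySem.Set.add g n else g) grown) acc).toFinset
        = acc.toFinset ∪ m.foldr (fun c A => ((nbrs c).filter (okB grid v)).toFinset ∪ A) ∅ := by
  induction m with
  | nil => intro acc hacc; exact ⟨hacc, by simp⟩
  | cons c m ih =>
      intro acc hacc
      rw [List.foldl_cons]
      obtain ⟨a1, a2⟩ := addfold_spec grid v (nbrs c) acc hacc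
      obtain ⟨h1, h2⟩ := ih _ a1
      refine ⟨h1, ?_⟩
      rw [h2, a2, List.foldr_cons, Finset.union_assoc]

lemma foldr_union_biUnion (m : List (Int × Int)) (f : (Int × Int) → Finset (Int × Int)) :
    m.foldr (fun c A => f c ∪ A) ∅ = m.toFinset.biUnion f := by
  induction m with
  | nil => simp
  | cons c m ih => rw [List.foldr_cons, List.toFinset_cons, Finset.biUnion_insert, ih]

lemma iterfold_spec (grid : List (List Int)) (v : Int) :
    ∀ (its : List Int) (l : List (Int × Int)), l.Nodup →
      (its.foldl (fun comp _ =>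
        comp.foldl (fun grown c =>
          (nbrs c).foldl (fun g n =>
            if 0 ≤ n.1 ∧ n.1 < 5 ∧ 0 ≤ n.2 ∧ n.2 < 5 ∧ gget grid n.1 n.2 = v
            then PySem.Set.add g n else g) grown) comp) l).Nodup ∧
      (its.foldl (fun comp _ =>
        comp.foldl (fun grown c =>
          (nbrs c).foldl (fun g n =>
            if 0 ≤ n.1 ∧ n.1 < 5 ∧ 0 ≤ n.2 ∧ n.2 < 5 ∧ gget grid n.1 n.2 = v
            then PySem.Set.add g n else g) grown) comp) l).toFinset
        = (expandv grid v)^[its.length] l.toFinset := by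
  intro its
  induction its with
  | nil => intro l hl; exact ⟨hl, by simp⟩
  | cons it its ih =>
      intro l hl
      rw [List.foldl_cons]
      obtain ⟨a1, a2⟩ := midfold_spec grid v l l hl
      obtain ⟨h1, h2⟩ := ih _ a1
      refine ⟨h1, ?_⟩
      rw [h2, List.length_cons, Function.iterate_succ_apply, a2,
        foldr_union_biUnion]
      rfl

lemma component_spec (grid : List (List Int)) (si sj : Int) :
    (component grid si sj).Nodup ∧
    (component grid si sj).toFinset = compv grid (gget grid si sj) (si, sj) := by
  obtain ⟨h1, h2⟩ := iterfold_spec grid (gget grid si sj) (PySem.List.pyRange 0 25 1)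
    [(si, sj)] (List.nodup_singleton _)
  have hlen : (PySem.List.pyRange 0 25 1).length = 25 := by decide
  rw [hlen] at h2
  refine ⟨h1, ?_⟩
  rw [show (component grid si sj) = ((PySem.List.pyRange 0 25 1).foldl (fun comp _ =>
        comp.foldl (fun grown c =>
          (nbrs c).foldl (fun g n =>
            if 0 ≤ n.1 ∧ n.1 < 5 ∧ 0 ≤ n.2 ∧ n.2 < 5 ∧ gget grid n.1 n.2 = gget grid si sj
            then PySem.Set.add g n else g) grown) comp) [(si, sj)]) from rfl]
  rw [h2]
  congr 1

lemma component_length (grid : List (List Int)) (p : Int × Int) :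
    (component grid p.1 p.2).length = (C grid p).card := by
  obtain ⟨h1, h2⟩ := component_spec grid p.1 p.2
  have := List.toFinset_card_of_nodup h1
  rw [h2] at this
  exact this.symm

lemma count_alt_eq (grid : List (List Int)) (flag : Int) :
    count_alt grid flag = ((cellsL.filter (fun p =>
      decide (gget grid p.1 p.2 ≠ 0 ∧ 3 ≤ (component grid p.1 p.2).length))).length : Int) := by
  have h := foldl_pair (fun (acc : List (Int × Int)) p =>
      if gget grid p.1 p.2 ≠ 0 ∧ 3 ≤ (component grid p.1 p.2).length then acc ++ [p] else acc)
    (PySem.List.pyRange 0 5 1) (PySem.List.pyRange 0 5 1) []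
  have h2 : count_alt grid flag = ((cellsL.foldl (fun (acc : List (Int × Int)) p =>
      if gget grid p.1 p.2 ≠ 0 ∧ 3 ≤ (component grid p.1 p.2).length then acc ++ [p] else acc)
      []).length : Int) := congrArg (fun l : List (Int × Int) => (l.length : Int)) h
  rw [h2]
  congr 2
  have hb : (fun (acc : List (Int × Int)) p =>
      if gget grid p.1 p.2 ≠ 0 ∧ 3 ≤ (component grid p.1 p.2).length then acc ++ [p] else acc)
      = (fun (acc : List (Int × Int)) p =>
        if (fun q => decide (gget grid q.1 q.2 ≠ 0 ∧ 3 ≤ (component grid q.1 q.2).length)) p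
            = true then acc ++ [(fun (x : Int × Int) => x) p] else acc) := by
    funext acc p
    by_cases hp : gget grid p.1 p.2 ≠ 0 ∧ 3 ≤ (component grid p.1 p.2).length
    · simp [hp]
    · simp [hp]
  rw [hb, PySem.List.foldl_append_if, List.map_id', List.nil_append]

-- ---- small facts for the final assembly ----

lemma mem_foldr_comps (grid : List (List Int)) (x : Int × Int) :
    ∀ m : List (Int × Int),
      (x ∈ m.foldr (fun d acc => (if gget grid d.1 d.2 ≠ 0 then C grid d else ∅) ∪ acc) ∅ ↔
        ∃ d ∈ m, gget grid d.1 d.2 ≠ 0 ∧ x ∈ C grid d) := by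
  intro m
  induction m with
  | nil => simp
  | cons d m ih =>
      rw [List.foldr_cons, Finset.mem_union, ih]
      by_cases h : gget grid d.1 d.2 ≠ 0
      · rw [if_pos h]
        constructor
        · rintro (hx | ⟨d', hd', hnz, hxd⟩)
          · exact ⟨d, List.mem_cons_self, h, hx⟩
          · exact ⟨d', List.mem_cons_of_mem _ hd', hnz, hxd⟩
        · rintro ⟨d', hd', hnz, hxd⟩
          rcases List.mem_cons.1 hd' with rfl | hd''
          · exact Or.inl hxd
          · exact Or.inr ⟨d', hd'', hnz, hxd⟩
      · rw [if_neg h]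
        constructor
        · rintro (hx | ⟨d', hd', hnz, hxd⟩)
          · exact absurd hx (Finset.notMem_empty x)
          · exact ⟨d', List.mem_cons_of_mem _ hd', hnz, hxd⟩
        · rintro ⟨d', hd', hnz, hxd⟩
          rcases List.mem_cons.1 hd' with rfl | hd''
          · exact absurd hnz h
          · exact Or.inr ⟨d', hd'', hnz, hxd⟩

lemma foldr_comps_eq (grid : List (List Int)) :
    cellsL.foldr (fun d acc => (if gget grid d.1 d.2 ≠ 0 then C grid d else ∅) ∪ acc) ∅
      = U25.filter (fun x => gget grid x.1 x.2 ≠ 0) := by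
  ext x
  rw [mem_foldr_comps, Finset.mem_filter, mem_U25]
  constructor
  · rintro ⟨d, hd, hnz, hx⟩
    have hind := (mem_cellsL d).1 hd
    have hv := compv_vals grid _ d hind rfl x hx
    exact ⟨hv.1, by rw [hv.2]; exact hnz⟩
  · rintro ⟨hinb, hnz⟩
    exact ⟨x, (mem_cellsL x).2 hinb, hnz, self_mem_compv grid _ x⟩

lemma trueW_replicate : trueW (List.replicate 5 (List.replicate 5 false)) = ∅ := by
  ext p
  rw [mem_trueW]
  simp only [Finset.notMem_empty, iff_false, not_and]
  rintro ⟨h1, h2, h3, h4⟩ hv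
  rw [vget_eq_getD _ _ _ h1 h3, List.getD_replicate _ (by omega),
    List.getD_replicate _ (by omega)] at hv
  cases hv

-- ===== VERDICT (by name: the statement is the Claim_ definition above) =====
theorem count_spec : Claim_equal_count := by
  intro grid flag _ _
  show count grid flag = count_alt grid flag
  have hrep_shape : ShapeV (List.replicate 5 (List.replicate 5 false)) := by
    refine ⟨by simp, ?_⟩
    intro r hr
    rw [List.eq_of_mem_replicate hr]
    simp
  have hrep_true := trueW_replicate
  have hgood : GoodW grid (trueW (List.replicate 5 (List.replicate 5 false))) := by
    rw [hrep_true]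
    intro p hp
    exact absurd hp (Finset.notMem_empty p)
  obtain ⟨f1, f2, f3⟩ := outer_inv grid flag cellsL (List.replicate 5 (List.replicate 5 false)) 0
    (fun p hp => (mem_cellsL p).1 hp) hrep_shape hgood (by rw [hrep_true]; simp)
  rw [count_eq grid flag, f3, f2, hrep_true, foldr_comps_eq, Finset.empty_union,
    count_alt_eq grid flag]
  have hnat : ((U25.filter (fun x => gget grid x.1 x.2 ≠ 0)).filter
      (fun x => 3 ≤ (C grid x).card)).card
      = (cellsL.filter (fun p =>
          decide (gget grid p.1 p.2 ≠ 0 ∧ 3 ≤ (component grid p.1 p.2).length))).length := by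
    rw [Finset.filter_filter,
      ← List.toFinset_card_of_nodup (List.Nodup.filter _ nodup_cellsL)]
    apply congrArg Finset.card
    ext x
    simp only [List.mem_toFinset, List.mem_filter, Finset.mem_filter, mem_U25, mem_cellsL,
      decide_eq_true_eq, component_length]
  rw [hnat]
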